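-- pv_equiv track=rewrite | github.com/laclustr/CSP | Problem Sets/CSP-Pset3/grant_vance_pset3.py | get_gx_kernel
-- ===== SOURCE A (Python) =====
-- def get_gx_kernel(img, row, col):
-- 	new_px = []
-- 	for rgb_idx in range(len(img[row][col])):
-- 		total = 0
-- 		if row > 0 and col > 0:
-- 			total += img[row - 1][col - 1][rgb_idx] * -1
-- 		if row > 0 and col < len(img[0]) - 1:
-- 			total += img[row - 1][col + 1][rgb_idx] * 1
-- 		if col > 0:
-- 			total += img[row][col - 1][rgb_idx] * -2
-- 		if col < len(img[0]) - 1: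
-- 			total += img[row][col + 1][rgb_idx] * 2
-- 		if row < len(img) - 1 and col > 0:
-- 			total += img[row + 1][col - 1][rgb_idx] * -1
-- 		if row < len(img) - 1 and col < len(img[0]) - 1:
-- 			total += img[row + 1][col + 1][rgb_idx] * 1
-- 		new_px += [total]
-- 	return new_px
-- ===== SOURCE B (Python) =====
-- def get_gx_kernel(img, row, col):
-- 	h, w = len(img), len(img[0])
-- 	k = len(img[row][col])
-- 	if k == 0:
-- 		return []
-- 	acc = [0] * k
-- 	taps = []
-- 	if col > 0:
-- 		taps.append((col - 1, -1))
-- 	if col < w - 1: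
-- 		taps.append((col + 1, 1))
-- 	for c, s in taps:
-- 		if row > 0:
-- 			acc = [a + s * v for a, v in zip(acc, img[row - 1][c])]
-- 		acc = [a + 2 * s * v for a, v in zip(acc, img[row][c])]
-- 		if row < h - 1:
-- 			acc = [a + s * v for a, v in zip(acc, img[row + 1][c])]
-- 	return acc
-- ===== Notes on version B (the rewrite author's own statement) =====
-- stated objective: alternative
-- what changed: A loops over channel indices and, per channel, sums six individually guarded scalar kernel taps; B instead iterates over the (at most two) nonzero kernel columns and accumulates each column's three weighted pixel rows as whole channel VECTORS via elementwise zip-adds into an accumulator, with no per-channel indexing at all.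
import Mathlib
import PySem

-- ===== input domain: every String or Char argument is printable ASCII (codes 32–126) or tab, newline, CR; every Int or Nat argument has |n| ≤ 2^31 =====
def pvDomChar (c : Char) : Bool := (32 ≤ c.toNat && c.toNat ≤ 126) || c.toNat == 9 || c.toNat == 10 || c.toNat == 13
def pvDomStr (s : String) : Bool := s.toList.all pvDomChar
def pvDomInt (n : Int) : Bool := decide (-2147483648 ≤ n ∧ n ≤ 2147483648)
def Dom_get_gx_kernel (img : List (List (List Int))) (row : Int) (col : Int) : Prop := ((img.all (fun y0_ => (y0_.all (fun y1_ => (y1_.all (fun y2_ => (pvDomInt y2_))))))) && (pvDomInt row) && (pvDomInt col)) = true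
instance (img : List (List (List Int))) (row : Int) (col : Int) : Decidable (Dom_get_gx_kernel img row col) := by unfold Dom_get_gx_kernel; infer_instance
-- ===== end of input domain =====

-- B replaces A's per-channel loop with six guarded scalar taps by whole-vector arithmetic:
-- it walks the (at most two) nonzero kernel COLUMNS and accumulates each column's three
-- weighted pixel VECTORS into the result with elementwise zip-adds (objective: alternative).

-- img[r][c] and img[r][c][i] with Python indexing, with defaults (only used where Python would not raise)
def pvCell (img : List (List (List Int))) (r c : Int) : List Int :=
  PySem.List.pyGetD (PySem.List.pyGetD img r []) c []

def pvAt (img : List (List (List Int))) (r c i : Int) : Int :=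
  PySem.List.pyGetD (pvCell img r c) i 0

-- ===== PORT A =====
def get_gx_kernel (img : List (List (List Int))) (row : Int) (col : Int) : List Int :=
  (PySem.List.pyRange 0 ((pvCell img row col).length : Int) 1).foldl
    (fun new_px i =>
      let t0 : Int := 0
      let t1 := if row > 0 ∧ col > 0 then t0 + pvAt img (row - 1) (col - 1) i * (-1) else t0
      let t2 := if row > 0 ∧ col < PySem.List.len (PySem.List.pyGetD img 0 []) - 1 then t1 + pvAt img (row - 1) (col + 1) i * 1 else t1
      let t3 := if col > 0 then t2 + pvAt img row (col - 1) i * (-2) else t2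
      let t4 := if col < PySem.List.len (PySem.List.pyGetD img 0 []) - 1 then t3 + pvAt img row (col + 1) i * 2 else t3
      let t5 := if row < PySem.List.len img - 1 ∧ col > 0 then t4 + pvAt img (row + 1) (col - 1) i * (-1) else t4
      let t6 := if row < PySem.List.len img - 1 ∧ col < PySem.List.len (PySem.List.pyGetD img 0 []) - 1 then t5 + pvAt img (row + 1) (col + 1) i * 1 else t5
      new_px ++ [t6]) []

-- ===== PORT B =====
-- acc = [a + s * v for a, v in zip(acc, cell)]
def pvVStep (acc cell : List Int) (s : Int) : List Int :=
  (acc.zip cell).map (fun p => p.1 + s * p.2)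

-- the body of B's loop over taps (one kernel column accumulated into acc)
def pvTapStep (img : List (List (List Int))) (row : Int) (acc : List Int) (cs : Int × Int) : List Int :=
  let acc1 := if row > 0 then pvVStep acc (pvCell img (row - 1) cs.1) cs.2 else acc
  let acc2 := pvVStep acc1 (pvCell img row cs.1) (2 * cs.2)
  if row < PySem.List.len img - 1 then pvVStep acc2 (pvCell img (row + 1) cs.1) cs.2 else acc2

def get_gx_kernel_alt (img : List (List (List Int))) (row : Int) (col : Int) : List Int :=
  let w := PySem.List.len (PySem.List.pyGetD img 0 [])
  let k := (pvCell img row col).length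
  if k = 0 then []
  else
    let taps : List (Int × Int) :=
      (if col > 0 then [(col - 1, -1)] else []) ++ (if col < w - 1 then [(col + 1, 1)] else [])
    taps.foldl (pvTapStep img row) (List.replicate k 0)

-- ===== PRECONDITION & SPEC =====
-- Pre_ is exactly the closed-form condition under which the Python A returns (no IndexError):
-- row and col index img (Python negative indices allowed), and each of the six guarded
-- neighbour cells that A reads exists and has at least as many channels as img[row][col].
def pvCellOK (img : List (List (List Int))) (K : Nat) (r c : Int) : Bool :=
  match PySem.List.pyGet? img r with
  | none => false
  | some R =>
    match PySem.List.pyGet? R c with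
    | none => false
    | some cell => decide (K ≤ cell.length)

def Pre_get_gx_kernel (img : List (List (List Int))) (row : Int) (col : Int) : Prop :=
  (match PySem.List.pyGet? img row with
   | none => false
   | some R =>
     match PySem.List.pyGet? R col with
     | none => false
     | some px =>
       (decide (px.length = 0)) ||
       (let K := px.length
        let H := PySem.List.len img
        let W := PySem.List.len (PySem.List.pyGetD img 0 [])
        (!(decide (row > 0) && decide (col > 0)) || pvCellOK img K (row - 1) (col - 1)) &&
        (!(decide (row > 0) && decide (col < W - 1)) || pvCellOK img K (row - 1) (col + 1)) &&
        (!(decide (col > 0)) || pvCellOK img K row (col - 1)) &&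
        (!(decide (col < W - 1)) || pvCellOK img K row (col + 1)) &&
        (!(decide (row < H - 1) && decide (col > 0)) || pvCellOK img K (row + 1) (col - 1)) &&
        (!(decide (row < H - 1) && decide (col < W - 1)) || pvCellOK img K (row + 1) (col + 1)))) = true
instance (img : List (List (List Int))) (row : Int) (col : Int) : Decidable (Pre_get_gx_kernel img row col) := by
  unfold Pre_get_gx_kernel; infer_instance

def pvWitness_get_gx_kernel : List (List (List Int)) × Int × Int := ([[[1, 2]], [[3, 4]]], 0, 0)

def Spec_get_gx_kernel (img : List (List (List Int))) (row : Int) (col : Int) (out : List Int) : Prop := out = get_gx_kernel_alt img row col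
instance (img : List (List (List Int))) (row : Int) (col : Int) (out : List Int) : Decidable (Spec_get_gx_kernel img row col out) := by unfold Spec_get_gx_kernel; infer_instance

-- ===== CLAIM (what is proved, stated in full; the proofs are below) =====
def Claim_equal_get_gx_kernel : Prop := ∀ (img : List (List (List Int))) (row : Int) (col : Int), Dom_get_gx_kernel img row col → Pre_get_gx_kernel img row col → Spec_get_gx_kernel img row col (get_gx_kernel img row col)

-- ===== LEMMAS AND PROOFS =====

-- if the accessed entries exist, pvCell is the value pyGet? found
theorem pv_cell_of_get? {img : List (List (List Int))} {r c : Int} {R : List (List Int)} {px : List Int}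
    (hr : PySem.List.pyGet? img r = some R) (hc : PySem.List.pyGet? R c = some px) :
    pvCell img r c = px := by
  unfold pvCell
  simp [PySem.List.pyGetD, hr, hc]

-- pvCellOK gives the length bound on pvCell
theorem pv_len_of_cellOK {img : List (List (List Int))} {K : Nat} {r c : Int}
    (h : pvCellOK img K r c = true) : K ≤ (pvCell img r c).length := by
  unfold pvCellOK at h
  rcases hr : PySem.List.pyGet? img r with _ | R
  · simp [hr] at h
  rcases hc : PySem.List.pyGet? R c with _ | cell
  · simp [hr, hc] at h
  simp only [hr, hc] at h
  rw [pv_cell_of_get? hr hc]; simpa using h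

-- a zip-add step on a range-map accumulator, when the cell is long enough
theorem pvVStep_map (k : Nat) (f : Nat → Int) (cell : List Int) (s : Int)
    (h : k ≤ cell.length) :
    pvVStep ((List.range k).map f) cell s
      = (List.range k).map (fun j => f j + s * cell.getD j 0) := by
  apply List.ext_getElem
  · simp [pvVStep]; omega
  · intro j h1 h2
    have hj : j < cell.length := by simp [pvVStep] at h1; omega
    simp [pvVStep, List.getD_eq_getElem?_getD, List.getElem?_eq_getElem hj]


-- one tap (one kernel column) of B's fold, on a range-map accumulator
theorem pv_tap_eval (img : List (List (List Int))) (row : Int) (k : Nat) (f : Nat → Int) (c s : Int)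
    (hTop : row > 0 → k ≤ (pvCell img (row - 1) c).length)
    (hMid : k ≤ (pvCell img row c).length)
    (hBot : row < PySem.List.len img - 1 → k ≤ (pvCell img (row + 1) c).length) :
    pvTapStep img row ((List.range k).map f) (c, s)
    = (List.range k).map (fun j =>
        f j + (if row > 0 then s * (pvCell img (row - 1) c).getD j 0 else 0)
            + 2 * s * (pvCell img row c).getD j 0
            + (if row < PySem.List.len img - 1 then s * (pvCell img (row + 1) c).getD j 0 else 0)) := by
  unfold pvTapStep
  dsimp only
  by_cases ht : row > 0 <;> by_cases hb : row < PySem.List.len img - 1 <;>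
    simp only [ht, hb, if_true, if_false] <;>
    [ (rw [pvVStep_map k f _ _ (hTop ht),
          pvVStep_map k _ _ _ hMid,
          pvVStep_map k _ _ _ (hBot hb)]);
      (rw [pvVStep_map k f _ _ (hTop ht),
          pvVStep_map k _ _ _ hMid]);
      (rw [pvVStep_map k f _ _ hMid,
          pvVStep_map k _ _ _ (hBot hb)]);
      (rw [pvVStep_map k f _ _ hMid]) ] <;>
    exact List.map_congr_left (fun j _ => by ring)

-- ===== VERDICT (by name: the statement is the Claim_ definition above) =====
theorem get_gx_kernel_spec : Claim_equal_get_gx_kernel := by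
  intro img row col _ hpre
  unfold Spec_get_gx_kernel
  unfold Pre_get_gx_kernel at hpre
  rcases hr : PySem.List.pyGet? img row with _ | R
  · simp [hr] at hpre
  rcases hc : PySem.List.pyGet? R col with _ | px
  · simp [hr, hc] at hpre
  simp only [hr, hc] at hpre
  have hcell : pvCell img row col = px := pv_cell_of_get? hr hc
  by_cases hk0 : px.length = 0
  · unfold get_gx_kernel get_gx_kernel_alt
    rw [hcell, hk0]
    simp only [Nat.cast_zero]
    rw [PySem.List.pyRange_one_eq_nil (by omega)]
    simp
  · simp only [hk0, decide_false, Bool.false_or, Bool.and_eq_true, Bool.or_eq_true,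
      Bool.not_eq_eq_eq_not, Bool.not_true, Bool.and_eq_false_iff, decide_eq_false_iff_not] at hpre
    obtain ⟨⟨⟨⟨⟨h1, h2⟩, h3⟩, h4⟩, h5⟩, h6⟩ := hpre
    unfold get_gx_kernel get_gx_kernel_alt
    rw [hcell]
    rw [if_neg hk0]
    rw [PySem.List.foldl_append_singleton_eq_map, PySem.List.pyRange_one]
    simp only [Int.sub_zero, Int.toNat_natCast, List.map_map]
    have hrep : (List.replicate px.length (0 : Int)) = (List.range px.length).map (fun _ => 0) := by
      simp
    rw [hrep]
    by_cases hcl : col > 0 <;>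
      by_cases hcr : col < PySem.List.len (PySem.List.pyGetD img 0 []) - 1
    · -- both taps
      rw [if_pos hcl, if_pos hcr]
      simp only [List.singleton_append, List.foldl_cons, List.foldl_nil]
      rw [pv_tap_eval img row px.length _ (col - 1) (-1)
            (fun ht => pv_len_of_cellOK (h1.resolve_left (by push_neg; exact ⟨ht, hcl⟩)))
            (pv_len_of_cellOK (h3.resolve_left (not_not_intro hcl)))
            (fun hb => pv_len_of_cellOK (h5.resolve_left (by push_neg; exact ⟨hb, hcl⟩)))]
      rw [pv_tap_eval img row px.length _ (col + 1) 1
            (fun ht => pv_len_of_cellOK (h2.resolve_left (by push_neg; exact ⟨ht, hcr⟩)))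
            (pv_len_of_cellOK (h4.resolve_left (not_not_intro hcr)))
            (fun hb => pv_len_of_cellOK (h6.resolve_left (by push_neg; exact ⟨hb, hcr⟩)))]
      refine List.map_congr_left (fun j _ => ?_)
      by_cases hrt : row > 0 <;> by_cases hrb : row < PySem.List.len img - 1 <;>
        simp only [Function.comp, zero_add, hrt, hrb, hcl, hcr, and_true, true_and,
          and_false, false_and, and_self, if_true, if_false, ite_true, ite_false,
          pvAt, PySem.List.pyGetD_natCast] <;> ring
    · -- left tap only
      rw [if_pos hcl, if_neg hcr]
      simp only [List.append_nil, List.foldl_cons, List.foldl_nil]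
      rw [pv_tap_eval img row px.length _ (col - 1) (-1)
            (fun ht => pv_len_of_cellOK (h1.resolve_left (by push_neg; exact ⟨ht, hcl⟩)))
            (pv_len_of_cellOK (h3.resolve_left (not_not_intro hcl)))
            (fun hb => pv_len_of_cellOK (h5.resolve_left (by push_neg; exact ⟨hb, hcl⟩)))]
      refine List.map_congr_left (fun j _ => ?_)
      by_cases hrt : row > 0 <;> by_cases hrb : row < PySem.List.len img - 1 <;>
        simp only [Function.comp, zero_add, hrt, hrb, hcl, hcr, and_true, true_and,
          and_false, false_and, and_self, if_true, if_false, ite_true, ite_false,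
          pvAt, PySem.List.pyGetD_natCast] <;> ring
    · -- right tap only
      rw [if_neg hcl, if_pos hcr]
      simp only [List.nil_append, List.foldl_cons, List.foldl_nil]
      rw [pv_tap_eval img row px.length _ (col + 1) 1
            (fun ht => pv_len_of_cellOK (h2.resolve_left (by push_neg; exact ⟨ht, hcr⟩)))
            (pv_len_of_cellOK (h4.resolve_left (not_not_intro hcr)))
            (fun hb => pv_len_of_cellOK (h6.resolve_left (by push_neg; exact ⟨hb, hcr⟩)))]
      refine List.map_congr_left (fun j _ => ?_)
      by_cases hrt : row > 0 <;> by_cases hrb : row < PySem.List.len img - 1 <;>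
        simp only [Function.comp, zero_add, hrt, hrb, hcl, hcr, and_true, true_and,
          and_false, false_and, and_self, if_true, if_false, ite_true, ite_false,
          pvAt, PySem.List.pyGetD_natCast] <;> ring
    · -- no taps
      rw [if_neg hcl, if_neg hcr]
      simp only [List.nil_append, List.foldl_nil]
      refine List.map_congr_left (fun j _ => ?_)
      simp only [PySem.List.len_eq] at hcr
      simp [hcl, hcr]
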